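-- pv_equiv track=rewrite | github.com/Polyrom/ya-algo | sprint_8/non-finals/g_search_with_shift.py | find
-- ===== SOURCE A (Python) =====
-- def find(orig: list[int], pattern: list[int], start: int = 0) -> int | None:
--     if len(orig) < len(pattern):
--         return None
--     for pos in range(start, len(orig) - len(pattern) + 1):
--         match = True
--         for offset in range(len(pattern) - 1):
--             diff_pattern = pattern[offset + 1] - pattern[offset]
--             diff_orig = orig[pos + offset + 1] - orig[pos + offset]
--             if diff_pattern != diff_orig:
--                 match = False
--                 break
--         if match:
--             return pos
--     return None
-- ===== SOURCE B (Python) =====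
-- def find(orig: list[int], pattern: list[int], start: int = 0) -> int | None:
--     n, m = len(orig), len(pattern)
--     if n < m:
--         return None
--     if m == 0:
--         return start if start <= n else None
--     do = [b - a for a, b in zip(orig, orig[1:])]
--     dp = [b - a for a, b in zip(pattern, pattern[1:])]
--     best = None
--     for p in range(n - m, start - 1, -1):
--         if do[p:p + m - 1] == dp:
--             best = p
--     return best
-- ===== Notes on version B (the rewrite author's own statement) =====
-- stated objective: alternative
-- what changed: B precomputes the two difference sequences once and searches the pattern-difference list as a contiguous block via slice comparison, scanning candidate positions back-to-front with a last-write-wins accumulator instead of A's forward nested loop that recomputes element differences with an early break at every position.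
-- outside the precondition, e.g. on find([6, 6, 5], [0, 1], -1): A returns -1, B returns None; on find([1, 2], [5], -1): A returns -1, B returns -1
import Mathlib
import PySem

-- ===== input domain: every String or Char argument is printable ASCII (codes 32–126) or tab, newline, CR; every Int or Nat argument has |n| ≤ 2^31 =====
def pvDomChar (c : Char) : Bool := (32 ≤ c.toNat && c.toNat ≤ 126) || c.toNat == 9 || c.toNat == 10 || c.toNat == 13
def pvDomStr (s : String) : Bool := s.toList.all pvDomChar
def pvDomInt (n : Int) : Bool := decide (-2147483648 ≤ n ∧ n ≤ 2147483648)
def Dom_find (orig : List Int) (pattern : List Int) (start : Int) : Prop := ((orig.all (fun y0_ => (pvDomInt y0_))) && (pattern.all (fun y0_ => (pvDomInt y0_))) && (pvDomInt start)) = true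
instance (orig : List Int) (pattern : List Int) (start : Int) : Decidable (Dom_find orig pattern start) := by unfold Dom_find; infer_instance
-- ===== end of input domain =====

-- B precomputes both difference sequences once and compares slices, scanning back-to-front;
-- objective: alternative decomposition (not claimed faster).

-- ===== PORT A =====
-- inner 'for offset in range(len(pattern)-1)' with its break
def findMatch (orig : List Int) (pattern : List Int) (pos : Int) : List Int → Bool
  | [] => true  -- loop ran out of offsets: match stayed True
  | o :: rest =>
    if PySem.List.pyGetD pattern (o + 1) 0 - PySem.List.pyGetD pattern o 0
        ≠ PySem.List.pyGetD orig (pos + o + 1) 0 - PySem.List.pyGetD orig (pos + o) 0 then false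
    else findMatch orig pattern pos rest

-- outer 'for pos in range(start, len(orig)-len(pattern)+1)' with its early return
def findLoop (orig : List Int) (pattern : List Int) : List Int → Option Int
  | [] => none
  | pos :: rest =>
    if findMatch orig pattern pos (PySem.List.pyRange 0 ((pattern.length : Int) - 1) 1) then some pos
    else findLoop orig pattern rest

def find (orig : List Int) (pattern : List Int) (start : Int) : Option Int :=
  if (orig.length : Int) < (pattern.length : Int) then none
  else findLoop orig pattern
    (PySem.List.pyRange start ((orig.length : Int) - (pattern.length : Int) + 1) 1)

-- ===== PORT B =====
-- [b - a for a, b in zip(xs, xs[1:])]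
def pvDiffs (xs : List Int) : List Int := (xs.zip xs.tail).map (fun ab => ab.2 - ab.1)

def find_alt (orig : List Int) (pattern : List Int) (start : Int) : Option Int :=
  let n : Int := orig.length
  let m : Int := pattern.length
  if n < m then none
  else if m = 0 then (if start ≤ n then some start else none)
  else
    let d0 := pvDiffs orig
    let dp := pvDiffs pattern
    (PySem.List.pyRange (n - m) (start - 1) (-1)).foldl
      (fun best p => if PySem.List.slice d0 (some p) (some (p + m - 1)) = dp then some p else best)
      none

-- ===== PRECONDITION & SPEC =====
-- Pre_ excludes negative start, which is outside the search's natural domain: there A either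
-- raises IndexError or returns accidental negative positions found via Python's negative-index
-- wraparound (e.g. orig=[6,6,5], pattern=[0,1], start=-1 returns -1).
def Pre_find (orig : List Int) (pattern : List Int) (start : Int) : Prop := 0 ≤ start
instance (orig : List Int) (pattern : List Int) (start : Int) : Decidable (Pre_find orig pattern start) := by unfold Pre_find; infer_instance
def pvWitness_find : List Int × List Int × Int := ([1, 2, 3], [4, 5], 0)

def Spec_find (orig : List Int) (pattern : List Int) (start : Int) (out : Option Int) : Prop := out = find_alt orig pattern start
instance (orig : List Int) (pattern : List Int) (start : Int) (out : Option Int) : Decidable (Spec_find orig pattern start out) := by unfold Spec_find; infer_instance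

-- ===== CLAIM (what is proved, stated in full; the proofs are below) =====
def Claim_equal_find : Prop := ∀ (orig : List Int) (pattern : List Int) (start : Int), Dom_find orig pattern start → Pre_find orig pattern start → Spec_find orig pattern start (find orig pattern start)

-- ===== LEMMAS AND PROOFS =====

theorem pvDiffs_length (xs : List Int) : (pvDiffs xs).length = xs.length - 1 := by
  simp [pvDiffs, List.length_zip, List.length_tail]

theorem pvDiffs_getElem (xs : List Int) (i : Nat) (h : i < (pvDiffs xs).length) :
    (pvDiffs xs)[i] = xs[i + 1]'(by have := pvDiffs_length xs; omega) - xs[i]'(by have := pvDiffs_length xs; omega) := by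
  have hlen := pvDiffs_length xs
  simp only [pvDiffs, List.getElem_map, List.getElem_zip]
  congr 1
  rw [List.getElem_tail]

-- A's inner loop is an 'all' over the offset list
theorem findMatch_eq_all (orig pattern : List Int) (pos : Int) (l : List Int) :
    findMatch orig pattern pos l
      = l.all (fun o => PySem.List.pyGetD pattern (o + 1) 0 - PySem.List.pyGetD pattern o 0
          = PySem.List.pyGetD orig (pos + o + 1) 0 - PySem.List.pyGetD orig (pos + o) 0) := by
  induction l with
  | nil => rfl
  | cons o rest ih =>
    simp only [findMatch, List.all_cons, ih]
    by_cases h : PySem.List.pyGetD pattern (o + 1) 0 - PySem.List.pyGetD pattern o 0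
        = PySem.List.pyGetD orig (pos + o + 1) 0 - PySem.List.pyGetD orig (pos + o) 0
    · simp [h]
    · simp [h]

-- A's outer loop is find?
theorem findLoop_as_first (orig pattern : List Int) (l : List Int) :
    findLoop orig pattern l
      = l.find? (fun pos => findMatch orig pattern pos (PySem.List.pyRange 0 ((pattern.length : Int) - 1) 1)) := by
  induction l with
  | nil => rfl
  | cons pos rest ih =>
    simp only [findLoop, List.find?_cons, ih]
    by_cases h : findMatch orig pattern pos (PySem.List.pyRange 0 ((pattern.length : Int) - 1) 1)
    · simp [h]
    · simp [h]

-- B's fold keeps the LAST match, i.e. the first match of the reversed list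
theorem foldl_lastMatch (C : Int → Prop) [DecidablePred C] (l : List Int) (acc : Option Int) :
    l.foldl (fun best p => if C p then some p else best) acc
      = (l.reverse.find? (fun p => decide (C p))).or acc := by
  induction l generalizing acc with
  | nil => simp
  | cons x t ih =>
    simp only [List.foldl_cons, ih, List.reverse_cons, List.find?_append]
    by_cases h : C x
    · cases (t.reverse.find? (fun p => decide (C p))) <;> simp [h, Option.or]
    · cases (t.reverse.find? (fun p => decide (C p))) <;> simp [h, Option.or]

theorem pyRange_one_nil {a b : Int} (h : b ≤ a) : PySem.List.pyRange a b 1 = [] := by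
  simp only [PySem.List.pyRange]
  norm_num
  intro hab
  omega

-- reversing a step -1 range gives the step 1 range
theorem pyRange_neg_one_reverse (a b : Int) :
    (PySem.List.pyRange a b (-1)).reverse = PySem.List.pyRange (b + 1) (a + 1) 1 := by
  simp only [PySem.List.pyRange]
  norm_num
  by_cases h : b < a
  · have h' : b + 1 < a + 1 := by omega
    simp only [if_pos h]
    have hc : (a - b).toNat = (a + 1 - (b + 1)).toNat := by omega
    apply List.ext_getElem
    · simp [hc]
    · intro i h1 h2
      simp only [List.length_reverse, List.length_map, List.length_range] at h1
      rw [List.getElem_reverse]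
      simp only [List.getElem_map, List.getElem_range, List.length_map, List.length_range]
      omega
  · have h' : ¬ (b + 1 < a + 1) := by omega
    simp [if_neg h]

theorem pvFindCongrMem (f g : Int → Bool) (l : List Int) (h : ∀ x ∈ l, f x = g x) :
    l.find? f = l.find? g := by
  induction l with
  | nil => rfl
  | cons x t ih =>
    simp only [List.find?_cons]
    rw [h x (by simp)]
    by_cases hg : g x
    · simp [hg]
    · simp [hg, ih (fun y hy => h y (by simp [hy]))]

-- the key pointwise fact: A's per-position test equals B's slice test
theorem match_eq_slice (orig pattern : List Int) (p : Int)
    (hm : 1 ≤ pattern.length) (hmn : pattern.length ≤ orig.length)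
    (hp0 : 0 ≤ p) (hpe : p ≤ (orig.length : Int) - (pattern.length : Int)) :
    findMatch orig pattern p (PySem.List.pyRange 0 ((pattern.length : Int) - 1) 1)
      = decide (PySem.List.slice (pvDiffs orig) (some p) (some (p + (pattern.length : Int) - 1)) = pvDiffs pattern) := by
  obtain ⟨q, rfl⟩ : ∃ q : Nat, p = (q : Int) := ⟨p.toNat, (Int.toNat_of_nonneg hp0).symm⟩
  have hq : q + pattern.length ≤ orig.length := by omega
  rw [findMatch_eq_all]
  have hcast : ((pattern.length : Int) - 1) = ((pattern.length - 1 : Nat) : Int) := by omega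
  rw [hcast, PySem.List.pyRange_zero_natCast, List.all_map]
  have h1 : (0 : Int) ≤ (q : Int) := by positivity
  have h2 : (0 : Int) ≤ (q : Int) + (pattern.length : Int) - 1 := by omega
  rw [PySem.List.slice_toNat _ h1 h2]
  simp only [Int.toNat_natCast]
  have h3 : ((q : Int) + (pattern.length : Int) - 1).toNat - q = pattern.length - 1 := by
    omega
  simp only [h3]
  have hd0 : (pvDiffs orig).length = orig.length - 1 := pvDiffs_length orig
  have hdp : (pvDiffs pattern).length = pattern.length - 1 := pvDiffs_length pattern
  rw [Bool.eq_iff_iff]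
  simp only [List.all_eq_true, Function.comp, List.mem_range, decide_eq_true_eq]
  constructor
  · intro hall
    apply List.ext_getElem
    · simp [hdp]
      omega
    · intro k hk1 hk2
      have hk : k < pattern.length - 1 := by simpa [hdp] using hk2
      have h := hall k hk
      have e1 : ((k : Int) + 1) = ((k + 1 : Nat) : Int) := by push_cast; ring
      have e2 : ((q : Int) + (k : Int) + 1) = ((q + k + 1 : Nat) : Int) := by push_cast; ring
      have e3 : ((q : Int) + (k : Int)) = ((q + k : Nat) : Int) := by push_cast; ring
      rw [e1, e2, e3, PySem.List.pyGetD_natCast, PySem.List.pyGetD_natCast,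
          PySem.List.pyGetD_natCast, PySem.List.pyGetD_natCast] at h
      rw [List.getD_eq_getElem _ _ (by omega), List.getD_eq_getElem _ _ (by omega),
          List.getD_eq_getElem _ _ (by omega), List.getD_eq_getElem _ _ (by omega)] at h
      rw [List.getElem_take, List.getElem_drop]
      rw [pvDiffs_getElem _ _ (by omega), pvDiffs_getElem _ _ (by omega)]
      omega
  · intro heq k hk
    have hk2 : k < (pvDiffs pattern).length := by omega
    have h := congrArg (fun l => l[k]?) heq
    simp only [List.getElem?_take, List.getElem?_drop] at h
    rw [List.getElem?_eq_getElem (by omega), List.getElem?_eq_getElem (by omega)] at h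
    simp only [if_pos hk, Option.some.injEq] at h
    rw [pvDiffs_getElem _ _ (by omega), pvDiffs_getElem _ _ (by omega)] at h
    have e1 : ((k : Int) + 1) = ((k + 1 : Nat) : Int) := by push_cast; ring
    have e2 : ((q : Int) + (k : Int) + 1) = ((q + k + 1 : Nat) : Int) := by push_cast; ring
    have e3 : ((q : Int) + (k : Int)) = ((q + k : Nat) : Int) := by push_cast; ring
    rw [e1, e2, e3, PySem.List.pyGetD_natCast, PySem.List.pyGetD_natCast,
        PySem.List.pyGetD_natCast, PySem.List.pyGetD_natCast]
    rw [List.getD_eq_getElem _ _ (by omega), List.getD_eq_getElem _ _ (by omega),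
        List.getD_eq_getElem _ _ (by omega), List.getD_eq_getElem _ _ (by omega)]
    omega

-- ===== VERDICT (by name: the statement is the Claim_ definition above) =====
theorem find_spec : Claim_equal_find := by
  intro orig pattern start _ hPre
  have hPre' : 0 ≤ start := hPre
  show find orig pattern start = find_alt orig pattern start
  simp only [find, find_alt]
  by_cases hnm : (orig.length : Int) < (pattern.length : Int)
  · simp [hnm]
  · simp only [if_neg hnm]
    by_cases hm0 : pattern.length = 0
    · obtain rfl : pattern = [] := List.length_eq_zero_iff.mp hm0
      have hnil := pyRange_one_nil (show (0 : Int) - 1 ≤ 0 by norm_num)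
      simp only [List.length_nil, Nat.cast_zero]
      by_cases hs : start < (orig.length : Int) - 0 + 1
      · rw [PySem.List.pyRange_one_cons hs]
        simp only [findLoop, List.length_nil, Nat.cast_zero, hnil, findMatch]
        rw [if_pos (show start ≤ (orig.length : Int) by omega)]
        simp
      · rw [pyRange_one_nil (by omega)]
        simp only [findLoop]
        rw [if_neg (show ¬ start ≤ (orig.length : Int) from by omega)]
        simp
    · have hm1 : 1 ≤ pattern.length := Nat.pos_of_ne_zero hm0
      rw [if_neg (by exact_mod_cast hm0)]
      rw [findLoop_as_first]
      rw [foldl_lastMatch (fun p => PySem.List.slice (pvDiffs orig) (some p)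
            (some (p + (pattern.length : Int) - 1)) = pvDiffs pattern)]
      rw [pyRange_neg_one_reverse]
      have e1 : start - 1 + 1 = start := by ring
      have e2 : (orig.length : Int) - (pattern.length : Int) + 1
          = (orig.length : Int) - (pattern.length : Int) + 1 := rfl
      rw [e1, Option.or_none]
      apply pvFindCongrMem
      intro x hx
      have hb := PySem.List.mem_pyRange_one.mp hx
      exact match_eq_slice orig pattern x hm1 (by omega) (by omega) (by omega)
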